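-- pv_equiv track=rewrite | github.com/szymonrachut/seo-flow | app/services/competitive_gap_service.py | _dominant_role_bucket
-- ===== SOURCE A (Python) =====
-- from typing import Any, Iterable, Literal
--
-- def _dominant_role_bucket(role_summary: dict[str, Any]) -> str:
--     if not isinstance(role_summary, dict) or not role_summary:
--         return "other"
--     normalized_counts = {
--         str(key): int(value or 0)
--         for key, value in role_summary.items()
--         if str(key)
--     }
--     if not normalized_counts:
--         return "other"
--     return min(
--         normalized_counts.items(),
--         key=lambda item: (-item[1], len(item[0]), item[0]),
--     )[0]
-- ===== SOURCE B (Python) =====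
-- def _dominant_role_bucket(role_summary):
--     if not isinstance(role_summary, dict) or not role_summary:
--         return "other"
--     counts = {str(key): int(value or 0) for key, value in role_summary.items() if str(key)}
--     if not counts:
--         return "other"
--     top = max(counts.values())
--     candidates = [key for key, value in counts.items() if value == top]
--     shortest = min(len(key) for key in candidates)
--     return min(key for key in candidates if len(key) == shortest)
-- ===== Notes on version B (the rewrite author's own statement) =====
-- stated objective: alternative
-- what changed: A takes a single min over the normalized dict with the composite key (-count, len(key), key); B never builds that key: it reduces in three plain stages - max of the counts, then the candidate keys holding that max, then the shortest of those, then the lexicographically smallest - which coordinate-wise computes the same lexicographic minimum.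
import Mathlib
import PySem

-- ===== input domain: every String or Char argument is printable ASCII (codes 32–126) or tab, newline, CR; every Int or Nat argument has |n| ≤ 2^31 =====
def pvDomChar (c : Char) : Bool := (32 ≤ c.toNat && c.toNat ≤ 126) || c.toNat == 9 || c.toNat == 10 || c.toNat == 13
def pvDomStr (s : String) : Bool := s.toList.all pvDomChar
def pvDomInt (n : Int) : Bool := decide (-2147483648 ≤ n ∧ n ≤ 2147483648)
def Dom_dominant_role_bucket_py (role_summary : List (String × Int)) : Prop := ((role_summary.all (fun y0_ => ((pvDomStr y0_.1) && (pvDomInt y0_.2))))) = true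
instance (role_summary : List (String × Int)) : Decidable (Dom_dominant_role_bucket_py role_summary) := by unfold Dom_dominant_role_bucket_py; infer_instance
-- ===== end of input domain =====

-- B replaces A's single min(...) with the composite key (-count, len, key) by three
-- staged plain reductions: max over the counts, then the shortest among the top-count
-- keys, then the lexicographically smallest among those (alternative decomposition;
-- not claimed faster).

-- ===== PORT A =====
-- A's composite key lambda: (-item[1], len(item[0]), item[0]) ordered lexicographically
-- (the string compared as its char list = Python's code-point string order).
def pvKey (kv : String × Int) : Int ×ₗ (Int ×ₗ List Char) :=
  toLex (-kv.2, toLex (PySem.Str.len kv.1, kv.1.toList))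

-- the dict argument arrives as an assoc list; PySem.Dict.ofList is its dict
def dominant_role_bucket_py (role_summary : List (String × Int)) : String :=
  let d := PySem.Dict.ofList role_summary
  if d.items = [] then "other"
  else
    -- {str(key): int(value or 0) for key, value in role_summary.items() if str(key)}
    let normalized := d.items.foldl
      (fun nd kv => if kv.1 ≠ "" then nd.insert kv.1 (if kv.2 = 0 then 0 else kv.2) else nd)
      PySem.Dict.empty
    -- 'if not normalized_counts: return "other"' + min(...): min? is none exactly there
    match PySem.List.min? normalized.items pvKey with
    | none => "other"
    | some m => m.1

-- ===== PORT B =====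
def dominant_role_bucket_py_alt (role_summary : List (String × Int)) : String :=
  let d := PySem.Dict.ofList role_summary
  if d.items = [] then "other"
  else
    -- counts = {str(key): int(value or 0) for key, value in role_summary.items() if str(key)}
    let counts := d.items.foldl
      (fun nd kv => if kv.1 ≠ "" then nd.insert kv.1 (if kv.2 = 0 then 0 else kv.2) else nd)
      PySem.Dict.empty
    if counts.items = [] then "other"
    else
      -- top = max(counts.values())
      match PySem.List.max? counts.values (fun v => v) with
      | none => "other" -- unreachable: counts is nonempty
      | some top =>
        -- candidates = [key for key, value in counts.items() if value == top]
        let candidates := (counts.items.filter (fun kv => kv.2 == top)).map Prod.fst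
        -- shortest = min(len(key) for key in candidates)
        match PySem.List.min? (candidates.map PySem.Str.len) (fun n => n) with
        | none => "other" -- unreachable: candidates is nonempty
        | some shortest =>
          -- return min(key for key in candidates if len(key) == shortest)
          match PySem.List.min? (candidates.filter (fun k => PySem.Str.len k == shortest)) (fun s => s) with
          | none => "other" -- unreachable
          | some b => b

-- ===== PRECONDITION & SPEC =====
def Spec_dominant_role_bucket_py (role_summary : List (String × Int)) (out : String) : Prop := out = dominant_role_bucket_py_alt role_summary
instance (role_summary : List (String × Int)) (out : String) : Decidable (Spec_dominant_role_bucket_py role_summary out) := by unfold Spec_dominant_role_bucket_py; infer_instance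

-- ===== CLAIM (what is proved, stated in full; the proofs are below) =====
def Claim_equal_dominant_role_bucket_py : Prop := ∀ (role_summary : List (String × Int)), Dom_dominant_role_bucket_py role_summary → Spec_dominant_role_bucket_py role_summary (dominant_role_bucket_py role_summary)

-- ===== LEMMAS AND PROOFS =====

theorem pvKey_injective : Function.Injective pvKey := by
  intro a b h
  simp only [pvKey, toLex_inj, Prod.mk.injEq] at h
  obtain ⟨h1, _, h3⟩ := h
  have hs : a.1 = b.1 := by
    have h4 := congrArg String.ofList h3
    simpa using h4
  have hv : a.2 = b.2 := by omega
  exact Prod.ext hs hv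

-- A's dict comprehension over a nodup-keyed items list is the filtered, value-mapped list
theorem pv_normalized_items (l : List (String × Int))
    (hnd : (l.map Prod.fst).Nodup) :
    (l.foldl
      (fun nd kv => if kv.1 ≠ "" then nd.insert kv.1 (if kv.2 = 0 then 0 else kv.2) else nd)
      PySem.Dict.empty).items
    = (l.filter (fun kv => kv.1 != "")).map (fun kv => (kv.1, if kv.2 = 0 then 0 else kv.2)) := by
  rw [PySem.List.foldl_ite_eq_foldl_filter (p := fun kv : String × Int => kv.1 ≠ "")]
  have hfeq : l.filter (fun kv => decide (kv.1 ≠ "")) = l.filter (fun kv => kv.1 != "") := by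
    apply List.filter_congr; intro kv _
    simp only [bne, decide_not]; congr 1
  rw [hfeq]
  rw [PySem.Dict.items_foldl_insert_fresh (l.filter (fun kv => kv.1 != "")) Prod.fst
      (fun kv => if kv.2 = 0 then 0 else kv.2) PySem.Dict.empty
      (fun a _ => PySem.Dict.contains_empty a.1)
      (List.Nodup.sublist (List.Sublist.map Prod.fst List.filter_sublist) hnd)]
  simp [PySem.Dict.empty]

-- ===== VERDICT (by name: the statement is the Claim_ definition above) =====
theorem dominant_role_bucket_py_spec : Claim_equal_dominant_role_bucket_py := by
  intro rs _
  unfold Spec_dominant_role_bucket_py dominant_role_bucket_py dominant_role_bucket_py_alt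
  set d := PySem.Dict.ofList rs with hd
  by_cases h0 : d.items = []
  · simp [h0]
  · simp only [h0, if_false]
    have hnd : (d.items.map Prod.fst).Nodup := PySem.Dict.nodup_keys_ofList rs
    rw [pv_normalized_items d.items hnd]
    set counts := d.items.foldl
      (fun nd kv => if kv.1 ≠ "" then nd.insert kv.1 (if kv.2 = 0 then 0 else kv.2) else nd)
      PySem.Dict.empty with hcounts
    set nl := (d.items.filter (fun kv => kv.1 != "")).map
      (fun kv => (kv.1, if kv.2 = 0 then 0 else kv.2)) with hnl
    have hci : counts.items = nl := pv_normalized_items d.items hnd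
    have hcv : counts.values = nl.map Prod.snd := by
      simp only [PySem.Dict.values, hci]
    by_cases hnl0 : nl = []
    · simp [hnl0, PySem.List.min?]
    · -- both sides take their non-'other' paths; show the selected keys agree
      simp only [if_neg hnl0]
      -- A's minimum
      rcases hmin : PySem.List.min? nl pvKey with _ | m
      · exact absurd ((PySem.List.min?_eq_none_iff nl pvKey).mp hmin) hnl0
      have hm1 : m ∈ nl := PySem.List.min?_mem hmin
      have hm2 : ∀ y ∈ nl, pvKey m ≤ pvKey y := PySem.List.min?_isMin hmin
      -- B's top
      rcases hmax : PySem.List.max? counts.values (fun v => v) with _ | top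
      · rw [hcv] at hmax
        have := (PySem.List.max?_eq_none_iff (nl.map Prod.snd) (fun v => v)).mp hmax
        exact absurd (List.map_eq_nil_iff.mp this) hnl0
      have htop1 : top ∈ nl.map Prod.snd := by
        have := PySem.List.max?_mem hmax; rwa [hcv] at this
      have htop2 : ∀ v ∈ nl.map Prod.snd, v ≤ top := by
        intro v hv
        have := PySem.List.max?_isMax hmax (y := v) (by rwa [hcv])
        simpa using this
      set candidates := (nl.filter (fun kv => kv.2 == top)).map Prod.fst with hcand
      have hcne : candidates ≠ [] := by
        obtain ⟨kv, hkv, hkv2⟩ := List.mem_map.mp htop1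
        apply List.ne_nil_of_mem (a := kv.1)
        exact List.mem_map.mpr ⟨kv, List.mem_filter.mpr ⟨hkv, by simp [hkv2]⟩, rfl⟩
      -- B's shortest
      rcases hsh : PySem.List.min? (candidates.map PySem.Str.len) (fun n => n) with _ | shortest
      · have := (PySem.List.min?_eq_none_iff _ _).mp hsh
        exact absurd (List.map_eq_nil_iff.mp this) hcne
      have hsh1 : shortest ∈ candidates.map PySem.Str.len := PySem.List.min?_mem hsh
      have hsh2 : ∀ k ∈ candidates, shortest ≤ PySem.Str.len k := by
        intro k hk
        have := PySem.List.min?_isMin hsh (y := PySem.Str.len k) (List.mem_map_of_mem hk)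
        simpa using this
      have hshE : (PySem.List.min? (List.map (PySem.Str.len ∘ Prod.fst)
          (List.filter (fun kv => kv.2 == top) nl)) (fun n => n)) = some shortest := by
        rw [← List.map_map]; exact hsh
      set finalists := candidates.filter (fun k => PySem.Str.len k == shortest) with hfin
      have hfne : finalists ≠ [] := by
        obtain ⟨k, hk, hkl⟩ := List.mem_map.mp hsh1
        exact List.ne_nil_of_mem (List.mem_filter.mpr ⟨hk, by simp only [beq_iff_eq]; exact hkl⟩)
      rcases hb : PySem.List.min? finalists (fun s => s) with _ | b
      · exact absurd ((PySem.List.min?_eq_none_iff _ _).mp hb) hfne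
      have hb1 : b ∈ finalists := PySem.List.min?_mem hb
      have hb2 : ∀ k ∈ finalists, b ≤ k := PySem.List.min?_isMin hb
      have hbE : (PySem.List.min? (List.filter (fun k => (↑k.length : Int) == shortest)
          (List.map Prod.fst (List.filter (fun kv => kv.2 == top) nl))) (fun s => s)) = some b := hb
      -- (b, top) ∈ nl
      obtain ⟨hbc, hblen⟩ := List.mem_filter.mp hb1
      have hblen : PySem.Str.len b = shortest := by simpa using hblen
      obtain ⟨kv, hkvf, hkv1⟩ := List.mem_map.mp hbc
      obtain ⟨hkvnl, hkvtop⟩ := List.mem_filter.mp hkvf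
      have hkvtop : kv.2 = top := by simpa using hkvtop
      have hbt : (b, top) ∈ nl := by
        have : kv = (b, top) := by
          cases kv; simp_all
        rwa [this] at hkvnl
      -- (b, top) is pvKey-minimal on nl
      have hbmin : ∀ y ∈ nl, pvKey (b, top) ≤ pvKey y := by
        rintro ⟨k, v⟩ hy
        have hvle : v ≤ top := htop2 v (List.mem_map_of_mem hy)
        simp only [pvKey, Prod.Lex.le_iff, ofLex_toLex]
        rcases lt_or_eq_of_le hvle with hlt | heq
        · exact Or.inl (by omega)
        · refine Or.inr ⟨by omega, ?_⟩
          have hkc : k ∈ candidates := by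
            exact List.mem_map.mpr ⟨(k, v), List.mem_filter.mpr ⟨hy, by simp [heq]⟩, rfl⟩
          have hlen : shortest ≤ PySem.Str.len k := hsh2 k hkc
          rcases lt_or_eq_of_le hlen with hlt2 | heq2
          · exact Or.inl (by omega)
          · refine Or.inr ⟨by omega, ?_⟩
            have hkf : k ∈ finalists := List.mem_filter.mpr ⟨hkc, by
              simp only [beq_iff_eq]; omega⟩
            exact String.le_iff_toList_le.mp (hb2 k hkf)
      -- antisymmetry + injective key ⇒ A's minimum is exactly (b, top)
      have : m = (b, top) :=
        pvKey_injective (le_antisymm (hm2 _ hbt) (hbmin m hm1))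
      simp [hshE, hbE, this]
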